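-- pv_equiv track=rewrite | github.com/lun-ai/sequential-teaching | data/scripts/sort_algorithms.py | recur_gen_list
-- ===== SOURCE A (Python) =====
-- def recur_gen_list(test_lists, nrange):
--     '''
--
--     Recursively generate lists for testing algorithm correctness
--
--     :param test_lists:
--     :param nrange:
--     :return:
--
--     '''
--     newL = []
--     for l in test_lists:
--         k = l.copy()
--         for i in range(1, nrange + 1):
--             if i not in k:
--                 newL.append([k + [i]])
--     return newL
-- ===== SOURCE B (Python) =====
-- def recur_gen_list(test_lists, nrange):
--     newL = []
--     for l in test_lists:
--         bounds = sorted({x for x in l if 1 <= x <= nrange})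
--         prev = 0
--         for b in bounds + [nrange + 1]:
--             for m in range(prev + 1, b):
--                 newL.append([l + [m]])
--             prev = b
--     return newL
-- ===== Notes on version B (the rewrite author's own statement) =====
-- stated objective: alternative
-- what changed: B drops the per-candidate membership test entirely: for each list it sorts the distinct in-range elements and walks the consecutive gaps between them (with 0 and nrange+1 as sentinels), emitting every integer strictly inside each gap, so the missing values are produced by gap enumeration over a sorted boundary list instead of by scanning 1..nrange and testing membership.
import Mathlib
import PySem

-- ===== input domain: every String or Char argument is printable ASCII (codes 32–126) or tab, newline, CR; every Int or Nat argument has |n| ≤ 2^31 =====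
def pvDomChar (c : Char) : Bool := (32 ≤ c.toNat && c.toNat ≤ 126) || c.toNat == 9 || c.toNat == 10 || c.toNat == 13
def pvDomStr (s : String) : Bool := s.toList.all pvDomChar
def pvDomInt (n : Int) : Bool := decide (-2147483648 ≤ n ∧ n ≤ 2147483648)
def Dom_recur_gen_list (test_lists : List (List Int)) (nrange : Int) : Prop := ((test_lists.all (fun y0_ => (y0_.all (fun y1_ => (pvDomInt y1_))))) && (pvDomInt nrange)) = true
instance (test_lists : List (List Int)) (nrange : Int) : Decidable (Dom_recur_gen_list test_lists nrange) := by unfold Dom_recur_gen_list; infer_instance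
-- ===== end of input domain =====

-- B replaces A's per-value membership scan by a sort-and-gap-walk: sort the distinct in-range elements and emit the integer gaps between consecutive ones (alternative algorithm, same results).


-- ===== PORT A =====
-- for l in test_lists: k = l.copy(); for i in range(1, nrange+1): if i not in k: newL.append([k + [i]])
def recur_gen_list (test_lists : List (List Int)) (nrange : Int) : List (List (List Int)) :=
  test_lists.foldl (fun newL l =>
    let k := l
    (PySem.List.pyRange 1 (nrange + 1) 1).foldl
      (fun acc i => if i ∉ k then acc ++ [[k ++ [i]]] else acc) newL) []

-- ===== PORT B =====
-- for l: bounds = sorted({x for x in l if 1 <= x <= nrange}); prev = 0;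
-- for b in bounds + [nrange+1]: for m in range(prev+1, b): newL.append([l + [m]]); prev = b
def recur_gen_list_alt (test_lists : List (List Int)) (nrange : Int) : List (List (List Int)) :=
  test_lists.foldl (fun newL l =>
    let bounds : List Int :=
      PySem.List.sorted
        (PySem.Set.ofList (l.filter (fun x => decide (1 ≤ x ∧ x ≤ nrange)))) (fun x => x) false
    ((bounds ++ [nrange + 1]).foldl
      (fun (st : Int × List (List (List Int))) b =>
        (b, st.2 ++ (PySem.List.pyRange (st.1 + 1) b 1).map (fun m => [l ++ [m]])))
      (0, newL)).2) []

-- ===== PRECONDITION & SPEC =====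
def Spec_recur_gen_list (test_lists : List (List Int)) (nrange : Int) (out : List (List (List Int))) : Prop := out = recur_gen_list_alt test_lists nrange
instance (test_lists : List (List Int)) (nrange : Int) (out : List (List (List Int))) : Decidable (Spec_recur_gen_list test_lists nrange out) := by unfold Spec_recur_gen_list; infer_instance

-- ===== CLAIM (what is proved, stated in full; the proofs are below) =====
def Claim_equal_recur_gen_list : Prop := ∀ (test_lists : List (List Int)) (nrange : Int), Dom_recur_gen_list test_lists nrange → Spec_recur_gen_list test_lists nrange (recur_gen_list test_lists nrange)

-- ===== LEMMAS AND PROOFS =====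

-- The gap walk over a strictly increasing list of bounds emits exactly the in-order
-- complement of the bounds inside the range (prev, hi).
lemma gap_walk (f : Int → List (List Int)) (hi : Int) :
    ∀ (bs : List Int) (prev : Int) (acc : List (List (List Int))),
      bs.Pairwise (· < ·) →
      (∀ b ∈ bs, prev < b ∧ b < hi) →
      ((bs ++ [hi]).foldl
        (fun (st : Int × List (List (List Int))) b =>
          (b, st.2 ++ (PySem.List.pyRange (st.1 + 1) b 1).map f)) (prev, acc)).2
      = acc ++ ((PySem.List.pyRange (prev + 1) hi 1).filter (fun i => decide (i ∉ bs))).map f := by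
  intro bs
  induction bs with
  | nil =>
      intro prev acc _ _
      simp [List.filter_eq_self.mpr]
  | cons b bs ih =>
      intro prev acc hpw hbd
      obtain ⟨hprevb, hbhi⟩ := hbd b (by simp)
      have hbs : ∀ x ∈ bs, b < x ∧ x < hi := by
        intro x hx
        exact ⟨(List.pairwise_cons.mp hpw).1 x hx, (hbd x (by simp [hx])).2⟩
      simp only [List.cons_append, List.foldl_cons]
      rw [ih b (acc ++ (PySem.List.pyRange (prev + 1) b 1).map f)
            (List.pairwise_cons.mp hpw).2 hbs]
      rw [PySem.List.pyRange_one_append (prev + 1) b hi (by omega) (by omega),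
          PySem.List.pyRange_one_cons hbhi]
      have h1 : (PySem.List.pyRange (prev + 1) b 1).filter (fun i => decide (i ∉ b :: bs))
          = PySem.List.pyRange (prev + 1) b 1 := by
        apply List.filter_eq_self.mpr
        intro x hx
        have := (PySem.List.mem_pyRange_one).mp hx
        simp only [decide_eq_true_eq, List.mem_cons, not_or]
        exact ⟨by omega, fun hxbs => by have := (hbs x hxbs).1; omega⟩
      have h2 : (PySem.List.pyRange (b + 1) hi 1).filter (fun i => decide (i ∉ b :: bs))
          = (PySem.List.pyRange (b + 1) hi 1).filter (fun i => decide (i ∉ bs)) := by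
        apply List.filter_congr
        intro x hx
        have := (PySem.List.mem_pyRange_one).mp hx
        have hxb : x ≠ b := by omega
        simp [hxb]
      rw [List.filter_append, h1, List.filter_cons_of_neg (by simp), h2,
          List.map_append, List.append_assoc]

-- The sorted distinct in-range elements: strictly increasing, membership = "in l and in range".
lemma bounds_mem (l : List Int) (nrange x : Int) :
    x ∈ PySem.List.sorted
        (PySem.Set.ofList (l.filter (fun x => decide (1 ≤ x ∧ x ≤ nrange)))) (fun x => x) false
      ↔ x ∈ l ∧ 1 ≤ x ∧ x ≤ nrange := by
  rw [PySem.List.mem_sorted, PySem.Set.mem_ofList]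
  simp

-- Per list: B's gap walk equals A's filtered-range append.
lemma per_list (l : List Int) (nrange : Int) (acc : List (List (List Int))) :
    ((PySem.List.sorted
        (PySem.Set.ofList (l.filter (fun x => decide (1 ≤ x ∧ x ≤ nrange)))) (fun x => x) false
      ++ [nrange + 1]).foldl
        (fun (st : Int × List (List (List Int))) b =>
          (b, st.2 ++ (PySem.List.pyRange (st.1 + 1) b 1).map (fun m => [l ++ [m]])))
        (0, acc)).2
    = (PySem.List.pyRange 1 (nrange + 1) 1).foldl
        (fun a i => if i ∉ l then a ++ [[l ++ [i]]] else a) acc := by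
  set bounds := PySem.List.sorted
    (PySem.Set.ofList (l.filter (fun x => decide (1 ≤ x ∧ x ≤ nrange)))) (fun x => x) false with hb
  have hpw : bounds.Pairwise (· < ·) := PySem.List.sorted_ofList_pairwise_lt _
  have hbd : ∀ b ∈ bounds, 0 < b ∧ b < nrange + 1 := by
    intro b hbm
    have := (bounds_mem l nrange b).mp hbm
    omega
  rw [gap_walk (fun m => [l ++ [m]]) (nrange + 1) bounds 0 acc hpw hbd]
  rw [PySem.List.foldl_append_ite (fun i => i ∉ l) (fun i => [l ++ [i]]) _ _]
  congr 1
  congr 1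
  apply List.filter_congr
  intro x hx
  have := (PySem.List.mem_pyRange_one).mp hx
  have hmemb := bounds_mem l nrange x
  rw [decide_eq_decide]
  constructor
  · intro h hxl; exact h (hmemb.mpr ⟨hxl, by omega, by omega⟩)
  · intro h hm; exact h (hmemb.mp hm).1

lemma outer_eq (nrange : Int) :
    ∀ (ts : List (List Int)) (acc : List (List (List Int))),
      ts.foldl (fun newL l =>
        ((PySem.List.sorted
            (PySem.Set.ofList (l.filter (fun x => decide (1 ≤ x ∧ x ≤ nrange)))) (fun x => x) false
          ++ [nrange + 1]).foldl
          (fun (st : Int × List (List (List Int))) b =>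
            (b, st.2 ++ (PySem.List.pyRange (st.1 + 1) b 1).map (fun m => [l ++ [m]])))
          (0, newL)).2) acc
      = ts.foldl (fun newL l =>
          (PySem.List.pyRange 1 (nrange + 1) 1).foldl
            (fun a i => if i ∉ l then a ++ [[l ++ [i]]] else a) newL) acc := by
  intro ts
  induction ts with
  | nil => intro acc; rfl
  | cons l rest ih =>
      intro acc
      simp only [List.foldl_cons]
      rw [per_list, ih]

-- ===== VERDICT (by name: the statement is the Claim_ definition above) =====
theorem recur_gen_list_spec : Claim_equal_recur_gen_list := by
  intro test_lists nrange _
  unfold Spec_recur_gen_list recur_gen_list recur_gen_list_alt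
  exact (outer_eq nrange test_lists []).symm
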